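-- pv_equiv track=rewrite | github.com/xuezy-mmi/SSpMM | RowMerge/sparse_matrix_format.py | return_all_zero_vec
-- ===== SOURCE A (Python) =====
-- import math
--
-- def return_all_zero_vec(vec_len, ROW, COL, origin_matrix):
--     num_vec_row = math.ceil(ROW / vec_len)
--     cnt = 0
--     for i in range(num_vec_row):
--         for j in range(COL):
--             flag = 0
--             for k in range(vec_len):
--                 if(i*vec_len+k < ROW):
--                     flag += origin_matrix[i*vec_len+k][j]
--             if(flag == 0):
--                 cnt += 1
--     return cnt
-- ===== SOURCE B (Python) =====
-- import math
--
-- def return_all_zero_vec(vec_len, ROW, COL, origin_matrix):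
--     num_vec_row = math.ceil(ROW / vec_len)
--     num_rows = len(origin_matrix)
--     cnt = 0
--     for i in range(num_vec_row):
--         col_sums = [0] * COL
--         for r in range(i * vec_len, min(i * vec_len + vec_len, ROW, num_rows)):
--             col_sums = [col_sums[j] + origin_matrix[r][j] for j in range(COL)]
--         cnt += col_sums.count(0)
--     return cnt
-- ===== Notes on version B (the rewrite author's own statement) =====
-- stated objective: alternative
-- what changed: Instead of re-scanning the block's rows separately for every column (triple nested loop with a per-column flag), B iterates once over each block's existing rows (row range clamped by ROW and the matrix length), maintains a per-block column-sum vector via a list comprehension, and counts its zeros with list.count.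
import Mathlib
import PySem

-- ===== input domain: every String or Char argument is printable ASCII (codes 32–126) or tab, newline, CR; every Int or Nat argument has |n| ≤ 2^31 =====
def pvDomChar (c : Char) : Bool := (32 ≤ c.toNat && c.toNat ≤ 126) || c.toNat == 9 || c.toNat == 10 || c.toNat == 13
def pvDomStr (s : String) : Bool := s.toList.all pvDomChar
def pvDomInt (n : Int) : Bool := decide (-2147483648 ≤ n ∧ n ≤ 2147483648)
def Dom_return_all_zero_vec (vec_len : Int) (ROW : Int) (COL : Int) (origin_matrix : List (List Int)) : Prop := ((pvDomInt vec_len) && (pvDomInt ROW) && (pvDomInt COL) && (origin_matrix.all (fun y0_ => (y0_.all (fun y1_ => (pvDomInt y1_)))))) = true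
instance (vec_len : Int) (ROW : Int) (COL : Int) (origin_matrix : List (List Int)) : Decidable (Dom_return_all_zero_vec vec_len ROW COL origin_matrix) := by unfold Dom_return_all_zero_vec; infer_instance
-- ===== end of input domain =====

-- B replaces A's per-column re-scan of each row block by one pass over the block's existing rows
-- maintaining a per-block column-sum vector (a comprehension) whose zeros are counted with list.count.


-- ===== PORT A =====
-- math.ceil(ROW / vec_len) on ints with |ROW|,|vec_len| ≤ 2^31 is exactly -((-ROW) // vec_len)
-- (the float quotient's rounding error is far below 1/vec_len at these magnitudes, so the ceiling is exact).
def return_all_zero_vec (vec_len : Int) (ROW : Int) (COL : Int) (origin_matrix : List (List Int)) : Int :=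
  (PySem.List.pyRange 0 (-(PySem.Int.floordiv (-ROW) vec_len)) 1).foldl (fun cnt i =>
    (PySem.List.pyRange 0 COL 1).foldl (fun cnt j =>
      if ((PySem.List.pyRange 0 vec_len 1).foldl (fun flag k =>
            if i * vec_len + k < ROW then
              flag + PySem.List.pyGetD (PySem.List.pyGetD origin_matrix (i * vec_len + k) []) j 0
            else flag) 0) == 0
      then cnt + 1 else cnt) cnt) 0

-- ===== PORT B =====
def return_all_zero_vec_alt (vec_len : Int) (ROW : Int) (COL : Int) (origin_matrix : List (List Int)) : Int :=
  (PySem.List.pyRange 0 (-(PySem.Int.floordiv (-ROW) vec_len)) 1).foldl (fun cnt i =>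
    cnt + (((PySem.List.pyRange (i * vec_len) (min (min (i * vec_len + vec_len) ROW) (origin_matrix.length : Int)) 1).foldl (fun cs r =>
        (PySem.List.pyRange 0 COL 1).map (fun j =>
          PySem.List.pyGetD cs j 0 + PySem.List.pyGetD (PySem.List.pyGetD origin_matrix r []) j 0))
      (PySem.List.pyRepeat [(0 : Int)] COL)).count 0 : Int)) 0

-- ===== PRECONDITION & SPEC =====
-- Pre_ excludes exactly the inputs on which the Python A raises: vec_len = 0 (ZeroDivisionError) and,
-- when all three bounds are positive, a matrix with fewer than ROW rows or a used row shorter than COL (IndexError).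
def Pre_return_all_zero_vec (vec_len : Int) (ROW : Int) (COL : Int) (origin_matrix : List (List Int)) : Prop :=
  vec_len ≠ 0 ∧ (vec_len < 0 ∨ ROW ≤ 0 ∨ COL ≤ 0 ∨
    (ROW ≤ (origin_matrix.length : Int) ∧ ∀ row ∈ origin_matrix.take ROW.toNat, COL ≤ (row.length : Int)))
instance (vec_len : Int) (ROW : Int) (COL : Int) (origin_matrix : List (List Int)) : Decidable (Pre_return_all_zero_vec vec_len ROW COL origin_matrix) := by unfold Pre_return_all_zero_vec; infer_instance

def pvWitness_return_all_zero_vec : Int × Int × Int × List (List Int) := (2, 3, 2, [[0, 1], [0, 2], [0, 3]])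

def Spec_return_all_zero_vec (vec_len : Int) (ROW : Int) (COL : Int) (origin_matrix : List (List Int)) (out : Int) : Prop := out = return_all_zero_vec_alt vec_len ROW COL origin_matrix
instance (vec_len : Int) (ROW : Int) (COL : Int) (origin_matrix : List (List Int)) (out : Int) : Decidable (Spec_return_all_zero_vec vec_len ROW COL origin_matrix out) := by unfold Spec_return_all_zero_vec; infer_instance

-- ===== CLAIM (what is proved, stated in full; the proofs are below) =====
def Claim_equal_return_all_zero_vec : Prop := ∀ (vec_len : Int) (ROW : Int) (COL : Int) (origin_matrix : List (List Int)), Dom_return_all_zero_vec vec_len ROW COL origin_matrix → Pre_return_all_zero_vec vec_len ROW COL origin_matrix → Spec_return_all_zero_vec vec_len ROW COL origin_matrix (return_all_zero_vec vec_len ROW COL origin_matrix)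

-- ===== LEMMAS AND PROOFS =====

-- the (totalized) matrix entry at row r, column j, and the guarded addend of block-row i, offset k
def pvEnt (origin_matrix : List (List Int)) (r j : Int) : Int :=
  PySem.List.pyGetD (PySem.List.pyGetD origin_matrix r []) j 0

def pvAdd (vec_len ROW : Int) (origin_matrix : List (List Int)) (i k j : Int) : Int :=
  if i * vec_len + k < ROW then pvEnt origin_matrix (i * vec_len + k) j else 0

lemma pvEnt_zero (origin_matrix : List (List Int)) (r j : Int)
    (h : (origin_matrix.length : Int) ≤ r) : pvEnt origin_matrix r j = 0 := by
  have h0 : PySem.List.pyGet? origin_matrix r = none := by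
    rw [PySem.List.pyGet?_eq_none_iff]
    simp only [PySem.Raise.InRange]
    omega
  have h1 : PySem.List.pyGetD origin_matrix r [] = [] := by
    show (PySem.List.pyGet? origin_matrix r).getD [] = []
    rw [h0]; rfl
  have h2 : PySem.List.pyGet? ([] : List Int) j = none := by
    rw [PySem.List.pyGet?_eq_none_iff]
    simp only [PySem.Raise.InRange, List.length_nil]
    omega
  show PySem.List.pyGetD (PySem.List.pyGetD origin_matrix r []) j 0 = 0
  rw [h1]
  show (PySem.List.pyGet? ([] : List Int) j).getD 0 = 0
  rw [h2]
  rfl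

-- re-index a range sum by its start
lemma map_shift (s v : Int) (H : Int → Int) :
    (PySem.List.pyRange 0 v 1).map (fun k => H (s + k)) = (PySem.List.pyRange s (s + v) 1).map H := by
  simp [PySem.List.pyRange_one, List.map_map, Function.comp_def]

-- a sum whose addends vanish from c on can be clipped at c
theorem sum_clip (g h : Int → Int) (c : Int)
    (hlow : ∀ r, r < c → h r = g r) (hhigh : ∀ r, c ≤ r → h r = 0) (a b : Int) :
    ((PySem.List.pyRange a b 1).map h).sum = ((PySem.List.pyRange a (min b c) 1).map g).sum := by
  by_cases hab : b ≤ a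
  · rw [PySem.List.pyRange_one_eq_nil hab, PySem.List.pyRange_one_eq_nil (le_trans (min_le_left b c) hab)]
    rfl
  · rw [not_le] at hab
    rw [PySem.List.pyRange_one_cons hab]
    by_cases hac : a < c
    · rw [PySem.List.pyRange_one_cons (lt_min hab hac)]
      simp only [List.map_cons, List.sum_cons]
      rw [hlow a hac, sum_clip g h c hlow hhigh (a + 1) b]
    · rw [not_lt] at hac
      rw [PySem.List.pyRange_one_eq_nil (le_trans (min_le_right b c) hac)]
      simp only [List.map_cons, List.sum_cons, List.map_nil, List.sum_nil]
      rw [hhigh a hac, sum_clip g h c hlow hhigh (a + 1) b]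
      rw [PySem.List.pyRange_one_eq_nil (le_trans (le_trans (min_le_right b c) hac) (by omega))]
      simp
termination_by (b - a).toNat
decreasing_by all_goals omega

-- A's inner flag for block i, column j is the sum of the guarded addends
lemma flagA_eq (vec_len ROW : Int) (origin_matrix : List (List Int)) (i j : Int) (ks : List Int) :
    ks.foldl (fun flag k =>
      if i * vec_len + k < ROW then
        flag + PySem.List.pyGetD (PySem.List.pyGetD origin_matrix (i * vec_len + k) []) j 0
      else flag) 0
    = (ks.map (fun k => pvAdd vec_len ROW origin_matrix i k j)).sum := by
  have h : ks.foldl (fun flag k =>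
      if i * vec_len + k < ROW then
        flag + PySem.List.pyGetD (PySem.List.pyGetD origin_matrix (i * vec_len + k) []) j 0
      else flag) 0
      = ks.foldl (fun flag k => flag + pvAdd vec_len ROW origin_matrix i k j) 0 := by
    apply PySem.List.foldl_congr_mem
    intro acc k _
    simp only [pvAdd, pvEnt]
    split_ifs <;> simp
  rw [h, PySem.List.foldl_add]
  simp

-- B's row-fold over a block maintains col_sums = (range COL).map (running column sums)
lemma colsums_inv (COL : Int) (origin_matrix : List (List Int)) (rs : List Int) (f : Int → Int) :
    rs.foldl (fun cs r =>
      (PySem.List.pyRange 0 COL 1).map (fun j =>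
        PySem.List.pyGetD cs j 0 + PySem.List.pyGetD (PySem.List.pyGetD origin_matrix r []) j 0))
      ((PySem.List.pyRange 0 COL 1).map f)
    = (PySem.List.pyRange 0 COL 1).map
        (fun j => f j + (rs.map (fun r => pvEnt origin_matrix r j)).sum) := by
  induction rs generalizing f with
  | nil => simp
  | cons r rs ih =>
    simp only [List.foldl_cons]
    have hstep : (PySem.List.pyRange 0 COL 1).map (fun j =>
        PySem.List.pyGetD ((PySem.List.pyRange 0 COL 1).map f) j 0
          + PySem.List.pyGetD (PySem.List.pyGetD origin_matrix r []) j 0)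
        = (PySem.List.pyRange 0 COL 1).map (fun j => f j + pvEnt origin_matrix r j) := by
      apply List.map_congr_left
      intro j hj
      rw [PySem.List.mem_pyRange_one] at hj
      rw [PySem.List.pyGetD_map_pyRange_of_nonneg f COL j 0 hj.1 hj.2]
      rfl
    rw [hstep, ih]
    apply List.map_congr_left
    intro j _
    simp only [List.map_cons, List.sum_cons]
    ring

-- [0]*COL is (range COL).map (const 0)
lemma replicate_eq_map_zero (COL : Int) :
    PySem.List.pyRepeat [(0 : Int)] COL = (PySem.List.pyRange 0 COL 1).map (fun _ => (0 : Int)) := by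
  rw [PySem.List.pyRepeat_singleton, List.map_const']
  rw [PySem.List.length_pyRange_one]
  norm_num

-- the guarded per-column sum over offsets equals the plain sum over the clamped row range
lemma block_sum (vec_len ROW : Int) (origin_matrix : List (List Int)) (i j : Int) :
    ((PySem.List.pyRange 0 vec_len 1).map (fun k => pvAdd vec_len ROW origin_matrix i k j)).sum
    = ((PySem.List.pyRange (i * vec_len) (min (min (i * vec_len + vec_len) ROW) (origin_matrix.length : Int)) 1).map
        (fun r => pvEnt origin_matrix r j)).sum := by
  have h1 : (PySem.List.pyRange 0 vec_len 1).map (fun k => pvAdd vec_len ROW origin_matrix i k j)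
      = (PySem.List.pyRange (i * vec_len) (i * vec_len + vec_len) 1).map
          (fun r => if r < ROW then pvEnt origin_matrix r j else 0) := by
    rw [← map_shift (i * vec_len) vec_len]
    rfl
  rw [h1,
    sum_clip (fun r => pvEnt origin_matrix r j) _ ROW
      (fun r hr => by simp [hr]) (fun r hr => by simp [not_lt.2 hr]),
    sum_clip (fun r => pvEnt origin_matrix r j) (fun r => pvEnt origin_matrix r j)
      (origin_matrix.length : Int) (fun _ _ => rfl) (fun r hr => pvEnt_zero origin_matrix r j hr)]

-- per-block contributions agree
lemma block_eq (vec_len ROW COL : Int) (origin_matrix : List (List Int)) (cnt i : Int) :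
    (PySem.List.pyRange 0 COL 1).foldl (fun cnt j =>
      if ((PySem.List.pyRange 0 vec_len 1).foldl (fun flag k =>
            if i * vec_len + k < ROW then
              flag + PySem.List.pyGetD (PySem.List.pyGetD origin_matrix (i * vec_len + k) []) j 0
            else flag) 0) == 0
      then cnt + 1 else cnt) cnt
    = cnt + (((PySem.List.pyRange (i * vec_len) (min (min (i * vec_len + vec_len) ROW) (origin_matrix.length : Int)) 1).foldl (fun cs r =>
        (PySem.List.pyRange 0 COL 1).map (fun j =>
          PySem.List.pyGetD cs j 0 + PySem.List.pyGetD (PySem.List.pyGetD origin_matrix r []) j 0))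
      (PySem.List.pyRepeat [(0 : Int)] COL)).count 0 : Int) := by
  rw [replicate_eq_map_zero, colsums_inv]
  have hA : (PySem.List.pyRange 0 COL 1).foldl (fun cnt j =>
      if ((PySem.List.pyRange 0 vec_len 1).foldl (fun flag k =>
            if i * vec_len + k < ROW then
              flag + PySem.List.pyGetD (PySem.List.pyGetD origin_matrix (i * vec_len + k) []) j 0
            else flag) 0) == 0
      then cnt + 1 else cnt) cnt
      = (PySem.List.pyRange 0 COL 1).foldl (fun cnt j =>
          if ((((PySem.List.pyRange (i * vec_len) (min (min (i * vec_len + vec_len) ROW) (origin_matrix.length : Int)) 1).map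
              (fun r => pvEnt origin_matrix r j)).sum : Int) == 0) then cnt + 1 else cnt) cnt := by
    apply PySem.List.foldl_congr_mem
    intro acc j _
    rw [flagA_eq, block_sum]
  rw [hA, PySem.List.foldl_if_add_one]
  congr 1
  rw [List.count_eq_countP, List.countP_map]
  simp only [Function.comp_def, zero_add]

-- ===== VERDICT (by name: the statement is the Claim_ definition above) =====
theorem return_all_zero_vec_spec : Claim_equal_return_all_zero_vec := by
  intro vec_len ROW COL origin_matrix _ _
  unfold Spec_return_all_zero_vec return_all_zero_vec return_all_zero_vec_alt
  apply PySem.List.foldl_congr_mem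
  intro cnt i _
  exact block_eq vec_len ROW COL origin_matrix cnt i
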